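-- pv_equiv track=rewrite | github.com/eliottcassidy2000/math | 04-computation/beta_coexistence_analysis.py | is_strongly_connected
-- ===== SOURCE A (Python) =====
-- def is_strongly_connected(A, n):
--     # BFS from 0 using forward edges
--     visited_fwd = set()
--     queue = [0]
--     visited_fwd.add(0)
--     while queue:
--         v = queue.pop(0)
--         for u in range(n):
--             if A[v][u] and u not in visited_fwd:
--                 visited_fwd.add(u)
--                 queue.append(u)
--     if len(visited_fwd) != n: return False
--     # BFS from 0 using backward edges
--     visited_bwd = set()
--     queue = [0]
--     visited_bwd.add(0)
--     while queue:
--         v = queue.pop(0)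
--         for u in range(n):
--             if A[u][v] and u not in visited_bwd:
--                 visited_bwd.add(u)
--                 queue.append(u)
--     return len(visited_bwd) == n
-- ===== SOURCE B (Python) =====
-- def is_strongly_connected(A, n):
--     # Floyd-Warshall reflexive-transitive closure instead of two BFS traversals.
--     if n <= 0:
--         return False  # a graph needs vertex 0 to be strongly connected
--     R = [[bool(A[i][j]) or i == j for j in range(n)] for i in range(n)]
--     for k in range(n):
--         R = [[R[i][j] or (R[i][k] and R[k][j]) for j in range(n)] for i in range(n)]
--     return all(R[0][u] for u in range(n)) and all(R[u][0] for u in range(n))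
-- ===== Notes on version B (the rewrite author's own statement) =====
-- stated objective: alternative
-- what changed: Replaces the two source-rooted BFS frontier expansions (queue + visited set, forward then backward edges) by one Floyd-Warshall all-pairs reflexive-transitive-closure dynamic program over intermediate vertices, then reads off row 0 and column 0.
-- outside the precondition, e.g. on is_strongly_connected([[1, 0], []], 2): A returns False, B raises IndexError
import Mathlib
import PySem

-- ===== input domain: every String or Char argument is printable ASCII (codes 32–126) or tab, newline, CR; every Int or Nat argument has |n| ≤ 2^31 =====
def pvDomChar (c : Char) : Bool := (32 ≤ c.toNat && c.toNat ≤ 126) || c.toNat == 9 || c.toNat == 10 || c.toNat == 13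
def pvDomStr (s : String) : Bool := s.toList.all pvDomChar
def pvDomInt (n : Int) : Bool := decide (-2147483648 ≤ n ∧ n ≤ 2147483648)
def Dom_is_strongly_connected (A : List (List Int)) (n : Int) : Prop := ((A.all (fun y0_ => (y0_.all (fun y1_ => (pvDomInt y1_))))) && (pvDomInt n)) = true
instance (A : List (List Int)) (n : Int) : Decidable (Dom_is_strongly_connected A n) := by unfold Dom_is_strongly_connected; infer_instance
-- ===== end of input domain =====

-- B replaces A's two source-rooted BFS traversals (forward and backward edges) by one
-- Floyd–Warshall reflexive-transitive-closure dynamic program (objective: alternative).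

-- ===== PORT A =====
-- A[i][j] as Python indexes it (the pyGetD default is never reached inside Pre_)
def pvEnt (A : List (List Int)) (i j : Int) : Int :=
  PySem.List.pyGetD (PySem.List.pyGetD A i []) j 0

-- the inner 'for u in range(n)' of one BFS round; state = (visited, queue)
def pvInner (g : Int → Int → Bool) (v : Int) (st : PySem.Set Int × List Int)
    (l : List Int) : PySem.Set Int × List Int :=
  l.foldl (fun st u =>
    if g v u && !(PySem.Set.contains st.1 u) then (PySem.Set.add st.1 u, st.2 ++ [u])
    else st) st

-- the 'while queue' loop (v = queue.pop(0)); the fuel only makes the recursion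
-- structural: each vertex is enqueued at most once, so 2*n+1 fuel is never exhausted
def pvBFS (g : Int → Int → Bool) (n : Int) :
    Nat → List Int → PySem.Set Int → PySem.Set Int
  | 0, _, vis => vis
  | _ + 1, [], vis => vis
  | fuel + 1, v :: q, vis =>
      let st := pvInner g v (vis, q) (PySem.List.pyRange 0 n 1)
      pvBFS g n fuel st.2 st.1

def is_strongly_connected (A : List (List Int)) (n : Int) : Bool :=
  let visF := pvBFS (fun v u => pvEnt A v u != 0) n (2 * n.toNat + 1) [0]
      (PySem.Set.add PySem.Set.empty 0)
  if (PySem.Set.len visF : Int) ≠ n then false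
  else
    let visB := pvBFS (fun v u => pvEnt A u v != 0) n (2 * n.toNat + 1) [0]
        (PySem.Set.add PySem.Set.empty 0)
    decide ((PySem.Set.len visB : Int) = n)

-- ===== PORT B =====
def pvRg (R : List (List Bool)) (i j : Int) : Bool :=
  PySem.List.pyGetD (PySem.List.pyGetD R i []) j false

def pvFWInit (A : List (List Int)) (n : Int) : List (List Bool) :=
  (PySem.List.pyRange 0 n 1).map (fun i =>
    (PySem.List.pyRange 0 n 1).map (fun j => (pvEnt A i j != 0) || (i == j)))

def pvFWStep (n : Int) (R : List (List Bool)) (k : Int) : List (List Bool) :=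
  (PySem.List.pyRange 0 n 1).map (fun i =>
    (PySem.List.pyRange 0 n 1).map (fun j => pvRg R i j || (pvRg R i k && pvRg R k j)))

def is_strongly_connected_alt (A : List (List Int)) (n : Int) : Bool :=
  if n ≤ 0 then false
  else
    let R := (PySem.List.pyRange 0 n 1).foldl (pvFWStep n) (pvFWInit A n)
    ((PySem.List.pyRange 0 n 1).all (fun u => pvRg R 0 u)) &&
    ((PySem.List.pyRange 0 n 1).all (fun u => pvRg R u 0))

-- ===== PRECONDITION & SPEC =====
-- For n > 0 the BFS indexes A[v][u] for visited v and u < n, which raises IndexError on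
-- rows shorter than n; requiring the first n rows to have length ≥ n also excludes some
-- inputs on which the short row happens to be unreachable and A still returns.
def Pre_is_strongly_connected (A : List (List Int)) (n : Int) : Prop :=
  0 < n → n ≤ (A.length : Int) ∧ ∀ row ∈ A.take n.toNat, n ≤ (row.length : Int)
instance (A : List (List Int)) (n : Int) : Decidable (Pre_is_strongly_connected A n) := by
  unfold Pre_is_strongly_connected; infer_instance

def pvWitness_is_strongly_connected : List (List Int) × Int := ([[0, 1], [1, 0]], 2)

def Spec_is_strongly_connected (A : List (List Int)) (n : Int) (out : Bool) : Prop := out = is_strongly_connected_alt A n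
instance (A : List (List Int)) (n : Int) (out : Bool) : Decidable (Spec_is_strongly_connected A n out) := by unfold Spec_is_strongly_connected; infer_instance

-- ===== CLAIM (what is proved, stated in full; the proofs are below) =====
def Claim_equal_is_strongly_connected : Prop := ∀ (A : List (List Int)) (n : Int), Dom_is_strongly_connected A n → Pre_is_strongly_connected A n → Spec_is_strongly_connected A n (is_strongly_connected A n)

-- ===== LEMMAS AND PROOFS =====

-- the edge relation both algorithms explore: an edge v→u inside [0, n)
def pvE (g : Int → Int → Bool) (n : Int) (v u : Int) : Prop :=
  0 ≤ v ∧ v < n ∧ 0 ≤ u ∧ u < n ∧ g v u = true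

-- BFS loop invariant
def pvInv (g : Int → Int → Bool) (n : Int) (q : List Int) (vis : List Int) : Prop :=
  (∀ x ∈ q, x ∈ vis) ∧ vis.Nodup ∧ (∀ x ∈ vis, 0 ≤ x ∧ x < n) ∧
  (∀ w, w ∈ vis → w ∉ q → ∀ u, pvE g n w u → u ∈ vis) ∧
  (∀ x ∈ vis, Relation.ReflTransGen (pvE g n) 0 x) ∧ 0 ∈ vis

lemma pvInner_char (g : Int → Int → Bool) (v : Int) :
    ∀ (l : List Int) (vis : PySem.Set Int) (q : List Int), vis.Nodup →
      (∀ u, u ∈ (pvInner g v (vis, q) l).1 ↔ u ∈ vis ∨ (u ∈ l ∧ g v u = true)) ∧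
      (∀ x, x ∈ (pvInner g v (vis, q) l).2 ↔
        x ∈ q ∨ (x ∈ (pvInner g v (vis, q) l).1 ∧ x ∉ vis)) ∧
      (pvInner g v (vis, q) l).1.Nodup ∧
      (pvInner g v (vis, q) l).2.length + vis.length
        = q.length + (pvInner g v (vis, q) l).1.length ∧
      vis.length ≤ (pvInner g v (vis, q) l).1.length := by
  intro l
  induction l with
  | nil =>
    intro vis q hnd
    refine ⟨by simp [pvInner], by simp [pvInner], hnd, by simp [pvInner], le_refl _⟩
  | cons a l ih =>
    intro vis q hnd
    by_cases hc : (g v a && !(PySem.Set.contains vis a)) = true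
    · have hga : g v a = true := (Bool.and_eq_true _ _ |>.mp hc).1
      have hna : a ∉ vis := by
        have := (Bool.and_eq_true _ _ |>.mp hc).2
        simpa [PySem.Set.contains_iff] using this
      have hstep : pvInner g v (vis, q) (a :: l)
          = pvInner g v (vis ++ [a], q ++ [a]) l := by
        simp [pvInner, hga, hna]
      have hnd' : (vis ++ [a] : List Int).Nodup := by
        simp [List.nodup_append, hnd]
        intro x hx hxa
        exact hna (hxa ▸ hx)
      obtain ⟨h1, h2, h3, h4, h5⟩ := ih (vis ++ [a]) (q ++ [a]) hnd'
      rw [hstep]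
      refine ⟨?_, ?_, h3, by simp at h4 ⊢; omega, by simp at h5 ⊢; omega⟩
      · intro u
        rw [h1 u]
        by_cases hu : u = a
        · subst hu
          exact ⟨fun _ => Or.inr ⟨List.mem_cons_self, hga⟩, fun _ => Or.inl (by simp)⟩
        · simp only [List.mem_append, List.mem_cons, hu]
          tauto
      · intro x
        rw [h2 x]
        have hmem : a ∈ (pvInner g v (vis ++ [a], q ++ [a]) l).1 := by
          rw [h1 a]; simp
        by_cases hx : x = a
        · subst hx
          exact ⟨fun _ => Or.inr ⟨hmem, hna⟩, fun _ => Or.inl (by simp)⟩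
        · simp only [List.mem_append, List.mem_singleton, hx, or_false]
          try tauto
    · have hnot : ¬ (g v a = true ∧ a ∉ vis) := by
        intro ⟨x1, x2⟩
        exact hc (by simp [x1, x2])
      have hstep : pvInner g v (vis, q) (a :: l) = pvInner g v (vis, q) l := by
        simp [pvInner, hnot]
      obtain ⟨h1, h2, h3, h4, h5⟩ := ih vis q hnd
      rw [hstep]
      refine ⟨?_, h2, h3, h4, h5⟩
      intro u
      rw [h1 u]
      by_cases hu : u = a
      · subst hu
        constructor
        · rintro (h | h)
          · exact Or.inl h
          · exact Or.inr ⟨List.mem_cons_of_mem _ h.1, h.2⟩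
        · rintro (h | ⟨_, hg⟩)
          · exact Or.inl h
          · by_cases hv : u ∈ vis
            · exact Or.inl hv
            · exact absurd ⟨hg, hv⟩ hnot
      · simp only [List.mem_cons, hu, false_or]

lemma pvLen_le (n : Int) (l : List Int) (hnd : l.Nodup) (hr : ∀ x ∈ l, 0 ≤ x ∧ x < n) :
    l.length ≤ n.toNat := by
  have hs : l ⊆ PySem.List.pyRange 0 n 1 := by
    intro x hx
    have := hr x hx
    rw [PySem.List.mem_pyRange_one]
    omega
  have := (List.subperm_of_subset hnd hs).length_le
  simpa [PySem.List.length_pyRange_one] using this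

lemma pvBFS_run (g : Int → Int → Bool) (n : Int) :
    ∀ (fuel : Nat) (q vis : List Int), pvInv g n q vis →
      q.length + 2 * (n.toNat - vis.length) < fuel →
      (pvBFS g n fuel q vis).Nodup ∧
      (∀ u ∈ pvBFS g n fuel q vis, (0 ≤ u ∧ u < n) ∧ Relation.ReflTransGen (pvE g n) 0 u) ∧
      0 ∈ pvBFS g n fuel q vis ∧
      (∀ u, Relation.ReflTransGen (pvE g n) 0 u → u ∈ pvBFS g n fuel q vis) := by
  intro fuel
  induction fuel with
  | zero => intro q vis _ hlt; omega
  | succ fuel ih =>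
    intro q vis hinv hlt
    obtain ⟨hq, hnd, hr, hcl, hre, h0⟩ := hinv
    match q with
    | [] =>
      refine ⟨hnd, fun u hu => ⟨hr u hu, hre u hu⟩, h0, ?_⟩
      intro u h
      induction h with
      | refl => exact h0
      | tail hseg hedge ihh => exact hcl _ ihh (List.not_mem_nil) _ hedge
    | v :: q =>
      obtain ⟨c1, c2, c3, c4, c5⟩ :=
        pvInner_char g v (PySem.List.pyRange 0 n 1) vis q hnd
      set st := pvInner g v (vis, q) (PySem.List.pyRange 0 n 1) with hst
      have hvvis : v ∈ vis := hq v List.mem_cons_self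
      have hsub : ∀ x ∈ vis, x ∈ st.1 := fun x hx => (c1 x).mpr (Or.inl hx)
      have hq' : ∀ x ∈ st.2, x ∈ st.1 := by
        intro x hx
        rcases (c2 x).mp hx with h | h
        · exact hsub x (hq x (List.mem_cons_of_mem _ h))
        · exact h.1
      have hr' : ∀ x ∈ st.1, 0 ≤ x ∧ x < n := by
        intro x hx
        rcases (c1 x).mp hx with h | h
        · exact hr x h
        · have := PySem.List.mem_pyRange_one.mp h.1; omega
      have hcl' : ∀ w, w ∈ st.1 → w ∉ st.2 → ∀ u, pvE g n w u → u ∈ st.1 := by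
        intro w hw hw2 u hE
        obtain ⟨_, _, hu0, hun, hgw⟩ := hE
        by_cases hwv : w = v
        · subst hwv
          exact (c1 u).mpr (Or.inr ⟨PySem.List.mem_pyRange_one.mpr ⟨hu0, hun⟩, hgw⟩)
        · rcases (c1 w).mp hw with hwvis | hwnew
          · have hwnq : w ∉ q := fun hwq => hw2 ((c2 w).mpr (Or.inl hwq))
            have hwnvq : w ∉ v :: q := by
              simp [hwv, hwnq]
            exact hsub u (hcl w hwvis hwnvq u ⟨(hr w hwvis).1, (hr w hwvis).2, hu0, hun, hgw⟩)
          · by_cases hwvis : w ∈ vis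
            · have hwnq : w ∉ q := fun hwq => hw2 ((c2 w).mpr (Or.inl hwq))
              have hwnvq : w ∉ v :: q := by simp [hwv, hwnq]
              exact hsub u (hcl w hwvis hwnvq u ⟨(hr w hwvis).1, (hr w hwvis).2, hu0, hun, hgw⟩)
            · exact absurd ((c2 w).mpr (Or.inr ⟨hw, hwvis⟩)) hw2
      have hre' : ∀ x ∈ st.1, Relation.ReflTransGen (pvE g n) 0 x := by
        intro x hx
        rcases (c1 x).mp hx with h | h
        · exact hre x h
        · have hxb := PySem.List.mem_pyRange_one.mp h.1
          have hvb := hr v hvvis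
          exact (hre v hvvis).tail ⟨hvb.1, hvb.2, hxb.1, hxb.2, h.2⟩
      have hlen1 : st.1.length ≤ n.toNat := pvLen_le n st.1 c3 hr'
      have hgoal : pvBFS g n (fuel + 1) (v :: q) vis = pvBFS g n fuel st.2 st.1 := rfl
      rw [hgoal]
      apply ih st.2 st.1 ⟨hq', c3, hr', hcl', hre', hsub 0 h0⟩
      simp at hlt
      omega

lemma pvBFS_main (g : Int → Int → Bool) (n : Int) (hn : 0 < n) :
    (pvBFS g n (2 * n.toNat + 1) [0] (PySem.Set.add PySem.Set.empty 0)).Nodup ∧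
    (∀ u ∈ pvBFS g n (2 * n.toNat + 1) [0] (PySem.Set.add PySem.Set.empty 0), 0 ≤ u ∧ u < n) ∧
    (∀ u, u ∈ pvBFS g n (2 * n.toNat + 1) [0] (PySem.Set.add PySem.Set.empty 0) ↔
      Relation.ReflTransGen (pvE g n) 0 u) := by
  have hinit : PySem.Set.add PySem.Set.empty 0 = ([0] : List Int) := rfl
  rw [hinit]
  have hnn : 1 ≤ n.toNat := by omega
  have hinv : pvInv g n [0] [0] := by
    refine ⟨fun x hx => hx, List.nodup_singleton 0, ?_, ?_, ?_, List.mem_singleton.mpr rfl⟩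
    · intro x hx
      rw [List.mem_singleton] at hx
      omega
    · intro w hw hnw
      exact absurd hw hnw
    · intro x hx
      rw [List.mem_singleton] at hx
      subst hx
      exact Relation.ReflTransGen.refl
  obtain ⟨o1, o2, o3, o4⟩ := pvBFS_run g n (2 * n.toNat + 1) [0] [0] hinv (by simp; omega)
  exact ⟨o1, fun u hu => (o2 u hu).1, fun u => ⟨fun hu => (o2 u hu).2, o4 u⟩⟩

lemma pvLen_eq_iff (n : Int) (hn : 0 < n) (l : List Int) (hnd : l.Nodup)
    (hr : ∀ x ∈ l, 0 ≤ x ∧ x < n) :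
    ((l.length : Int) = n ↔ ∀ u : Int, 0 ≤ u → u < n → u ∈ l) := by
  have hs : l ⊆ PySem.List.pyRange 0 n 1 := by
    intro x hx
    have := hr x hx
    rw [PySem.List.mem_pyRange_one]
    omega
  have hsp := List.subperm_of_subset hnd hs
  have hlen := hsp.length_le
  rw [PySem.List.length_pyRange_one] at hlen
  constructor
  · intro hlength u hu0 hun
    have hperm : l.Perm (PySem.List.pyRange 0 n 1) := by
      apply hsp.perm_of_length_le
      rw [PySem.List.length_pyRange_one]
      omega
    exact hperm.mem_iff.mpr (PySem.List.mem_pyRange_one.mpr ⟨hu0, by omega⟩)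
  · intro hall
    have hs2 : PySem.List.pyRange 0 n 1 ⊆ l := by
      intro x hx
      have := PySem.List.mem_pyRange_one.mp hx
      exact hall x this.1 (by omega)
    have := (List.subperm_of_subset (PySem.List.nodup_pyRange_one 0 n) hs2).length_le
    rw [PySem.List.length_pyRange_one] at this
    omega

-- Floyd–Warshall characteristic predicate: path from i to j using intermediates < k
def pvC (A : List (List Int)) (n : Int) : Nat → Int → Int → Prop
  | 0 => fun i j => i = j ∨ pvE (fun v u => pvEnt A v u != 0) n i j
  | k + 1 => fun i j => pvC A n k i j ∨ (pvC A n k i (k : Int) ∧ pvC A n k (k : Int) j)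

lemma pvRg_map (f : Int → Int → Bool) (n i j : Int) (hi : 0 ≤ i) (hi2 : i < n)
    (hj : 0 ≤ j) (hj2 : j < n) :
    pvRg ((PySem.List.pyRange 0 n 1).map (fun i =>
      (PySem.List.pyRange 0 n 1).map (fun j => f i j))) i j = f i j := by
  unfold pvRg
  rw [PySem.List.pyGetD_map_pyRange_of_nonneg _ _ _ _ hi hi2,
    PySem.List.pyGetD_map_pyRange_of_nonneg _ _ _ _ hj hj2]

lemma pvFW_entry (A : List (List Int)) (n : Int) :
    ∀ (k : Nat), (k : Int) ≤ n → ∀ i j : Int, 0 ≤ i → i < n → 0 ≤ j → j < n →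
      (pvRg ((PySem.List.pyRange 0 (k : Int) 1).foldl (pvFWStep n) (pvFWInit A n)) i j = true
        ↔ pvC A n k i j) := by
  intro k
  induction k with
  | zero =>
    intro _ i j hi0 hin hj0 hjn
    rw [show ((0 : Nat) : Int) = 0 from rfl, PySem.List.pyRange_one_eq_nil (le_refl 0)]
    simp only [List.foldl_nil]
    unfold pvFWInit
    rw [pvRg_map _ _ _ _ hi0 hin hj0 hjn]
    simp only [pvC, pvE, Bool.or_eq_true, bne_iff_ne, beq_iff_eq]
    constructor
    · rintro (h | h)
      · exact Or.inr ⟨hi0, hin, hj0, hjn, by simpa using h⟩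
      · exact Or.inl h
    · rintro (h | h)
      · exact Or.inr h
      · exact Or.inl (by simpa using h.2.2.2.2)
  | succ k ihk =>
    intro hk i j hi0 hin hj0 hjn
    have hk' : (k : Int) ≤ n := by push_cast at hk ⊢; omega
    have hkn : (k : Int) < n := by push_cast at hk; omega
    have hk0 : (0 : Int) ≤ (k : Int) := by positivity
    rw [show ((k + 1 : Nat) : Int) = (k : Int) + 1 by push_cast; ring,
      PySem.List.pyRange_one_succ_right hk0, List.foldl_append]
    simp only [List.foldl_cons, List.foldl_nil]
    set Rk := (PySem.List.pyRange 0 (k : Int) 1).foldl (pvFWStep n) (pvFWInit A n) with hRk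
    have hentry : pvRg (pvFWStep n Rk (k : Int)) i j
        = (pvRg Rk i j || (pvRg Rk i (k : Int) && pvRg Rk (k : Int) j)) := by
      unfold pvFWStep
      exact pvRg_map _ _ _ _ hi0 hin hj0 hjn
    rw [hentry]
    simp only [Bool.or_eq_true, Bool.and_eq_true]
    rw [ihk hk' i j hi0 hin hj0 hjn, ihk hk' i (k : Int) hi0 hin hk0 hkn,
      ihk hk' (k : Int) j hk0 hkn hj0 hjn]
    rfl

lemma pvC_refl (A : List (List Int)) (n : Int) : ∀ (k : Nat) (i : Int), pvC A n k i i := by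
  intro k
  induction k with
  | zero => exact fun i => Or.inl rfl
  | succ k ih => exact fun i => Or.inl (ih i)

lemma pvC_sound (A : List (List Int)) (n : Int) :
    ∀ (k : Nat) (i j : Int), pvC A n k i j →
      Relation.ReflTransGen (pvE (fun v u => pvEnt A v u != 0) n) i j := by
  intro k
  induction k with
  | zero =>
    rintro i j (h | h)
    · exact h ▸ Relation.ReflTransGen.refl
    · exact Relation.ReflTransGen.single h
  | succ k ih =>
    rintro i j (h | ⟨h1, h2⟩)
    · exact ih i j h
    · exact (ih i (k : Int) h1).trans (ih (k : Int) j h2)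

inductive pvPath (r : Int → Int → Prop) : Int → List Int → Int → Prop
  | edge {i j : Int} : r i j → pvPath r i [] j
  | cons {i x j : Int} {l : List Int} : r i x → pvPath r x l j → pvPath r i (x :: l) j

lemma pvPath_split (r : Int → Int → Prop) :
    ∀ (l1 : List Int) (m : Int) (l2 : List Int) (i j : Int),
      pvPath r i (l1 ++ m :: l2) j → pvPath r i l1 m ∧ pvPath r m l2 j := by
  intro l1
  induction l1 with
  | nil =>
    intro m l2 i j h
    cases h with
    | cons hr hp => exact ⟨pvPath.edge hr, hp⟩
  | cons a l1 ih =>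
    intro m l2 i j h
    cases h with
    | cons hr hp =>
      obtain ⟨p1, p2⟩ := ih m l2 a j hp
      exact ⟨pvPath.cons hr p1, p2⟩

lemma pvPath_mids (g : Int → Int → Bool) (n : Int) {i j : Int} {l : List Int}
    (h : pvPath (pvE g n) i l j) : ∀ m ∈ l, 0 ≤ m ∧ m < n := by
  induction h with
  | edge _ => simp
  | cons hr _ ih =>
    intro m hm
    rcases List.mem_cons.mp hm with h | h
    · obtain ⟨_, _, h3, h4, _⟩ := hr
      exact h ▸ ⟨h3, h4⟩
    · exact ih m h

lemma pvFirst_split (a : Int) : ∀ (l : List Int), a ∈ l →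
    ∃ s t, l = s ++ a :: t ∧ a ∉ s := by
  intro l
  induction l with
  | nil => intro h; exact absurd h (List.not_mem_nil)
  | cons x l ih =>
    intro h
    by_cases hx : x = a
    · exact ⟨[], l, by rw [hx]; rfl, List.not_mem_nil⟩
    · have hal : a ∈ l := by
        rcases List.mem_cons.mp h with h | h
        · exact absurd h.symm hx
        · exact h
      obtain ⟨s, t, heq, hna⟩ := ih hal
      exact ⟨x :: s, t, by rw [heq]; rfl, by
        intro hmem
        rcases List.mem_cons.mp hmem with h | h
        · exact hx h.symm
        · exact hna h⟩

lemma pvLast_split (a : Int) : ∀ (l : List Int), a ∈ l →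
    ∃ s t, l = s ++ a :: t ∧ a ∉ t := by
  intro l
  induction l with
  | nil => intro h; exact absurd h (List.not_mem_nil)
  | cons x l ih =>
    intro h
    by_cases hal : a ∈ l
    · obtain ⟨s, t, heq, hna⟩ := ih hal
      exact ⟨x :: s, t, by rw [heq]; rfl, hna⟩
    · have hx : x = a := by
        rcases List.mem_cons.mp h with h | h
        · exact h.symm
        · exact absurd h hal
      exact ⟨[], l, by rw [hx]; rfl, hal⟩

lemma pvPath_to_C (A : List (List Int)) (n : Int) :
    ∀ (k : Nat) (l : List Int) (i j : Int),
      pvPath (pvE (fun v u => pvEnt A v u != 0) n) i l j →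
      (∀ m ∈ l, 0 ≤ m ∧ m < (k : Int)) → pvC A n k i j := by
  intro k
  induction k with
  | zero =>
    intro l i j hp hm
    cases hp with
    | edge hr => exact Or.inr hr
    | cons hr hp' =>
      have := hm _ List.mem_cons_self
      push_cast at this
      omega
  | succ k ih =>
    intro l i j hp hm
    by_cases hk : (k : Int) ∈ l
    · obtain ⟨s, t, heq, hks⟩ := pvFirst_split _ l hk
      subst heq
      obtain ⟨p1, p2⟩ := pvPath_split _ s _ t i j hp
      have c1 : pvC A n k i (k : Int) := by
        apply ih s i (k : Int) p1
        intro m hms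
        have hb := hm m (List.mem_append.mpr (Or.inl hms))
        have hne : m ≠ (k : Int) := fun h => hks (h ▸ hms)
        constructor
        · exact hb.1
        · push_cast at hb ⊢
          omega
      have c2 : pvC A n k (k : Int) j := by
        by_cases hkt : (k : Int) ∈ t
        · obtain ⟨s2, t2, heq2, hkt2⟩ := pvLast_split _ t hkt
          subst heq2
          obtain ⟨_, p3⟩ := pvPath_split _ s2 _ t2 (k : Int) j p2
          apply ih t2 (k : Int) j p3
          intro m hmt
          have hb := hm m (by
            apply List.mem_append.mpr
            exact Or.inr (List.mem_cons_of_mem _ (List.mem_append.mpr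
              (Or.inr (List.mem_cons_of_mem _ hmt)))))
          have hne : m ≠ (k : Int) := fun h => hkt2 (h ▸ hmt)
          refine ⟨hb.1, ?_⟩
          push_cast at hb ⊢
          omega
        · apply ih t (k : Int) j p2
          intro m hmt
          have hb := hm m (List.mem_append.mpr (Or.inr (List.mem_cons_of_mem _ hmt)))
          have hne : m ≠ (k : Int) := fun h => hkt (h ▸ hmt)
          refine ⟨hb.1, ?_⟩
          push_cast at hb ⊢
          omega
      exact Or.inr ⟨c1, c2⟩
    · apply Or.inl
      apply ih l i j hp
      intro m hml
      have hb := hm m hml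
      have hne : m ≠ (k : Int) := fun h => hk (h ▸ hml)
      refine ⟨hb.1, ?_⟩
      push_cast at hb ⊢
      omega

lemma pvRTG_path (r : Int → Int → Prop) (i j : Int) :
    Relation.ReflTransGen r i j → i = j ∨ ∃ l, pvPath r i l j := by
  intro h
  induction h using Relation.ReflTransGen.head_induction_on with
  | refl => exact Or.inl rfl
  | head hr _ ih =>
    rcases ih with h | ⟨l, p⟩
    · exact Or.inr ⟨[], pvPath.edge (h ▸ hr)⟩
    · exact Or.inr ⟨_ :: l, pvPath.cons hr p⟩

lemma pvC_iff_RTG (A : List (List Int)) (n : Int) (hn : 0 < n) (i j : Int) :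
    pvC A n n.toNat i j ↔ Relation.ReflTransGen (pvE (fun v u => pvEnt A v u != 0) n) i j := by
  constructor
  · exact pvC_sound A n n.toNat i j
  · intro h
    rcases pvRTG_path _ i j h with heq | ⟨l, p⟩
    · exact heq ▸ pvC_refl A n n.toNat j
    · apply pvPath_to_C A n n.toNat l i j p
      intro m hm
      have := pvPath_mids _ n p m hm
      refine ⟨this.1, ?_⟩
      have : m < n := this.2
      omega

lemma pvRTG_rev (r r' : Int → Int → Prop) (h : ∀ x y, r x y → r' y x) {a b : Int}
    (hr : Relation.ReflTransGen r a b) : Relation.ReflTransGen r' b a := by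
  induction hr with
  | refl => exact Relation.ReflTransGen.refl
  | tail _ hedge ih => exact Relation.ReflTransGen.head (h _ _ hedge) ih

-- ===== VERDICT (by name: the statement is the Claim_ definition above) =====
theorem is_strongly_connected_spec : Claim_equal_is_strongly_connected := by
  intro A n _ _
  unfold Spec_is_strongly_connected
  by_cases hn : n ≤ 0
  · have ht : n.toNat = 0 := by omega
    have hr0 : PySem.List.pyRange 0 n 1 = [] := PySem.List.pyRange_one_eq_nil hn
    have h1n : ¬((1 : Int) = n) := by omega
    simp [is_strongly_connected, is_strongly_connected_alt, hn, ht, hr0, pvBFS, pvInner,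
      PySem.Set.len, h1n]
  · have hn' : 0 < n := by omega
    obtain ⟨ndF, bF, mF⟩ := pvBFS_main (fun v u => pvEnt A v u != 0) n hn'
    obtain ⟨ndB, bB, mB⟩ := pvBFS_main (fun v u => pvEnt A u v != 0) n hn'
    have hLF := pvLen_eq_iff n hn' _ ndF bF
    have hLB := pvLen_eq_iff n hn' _ ndB bB
    have hcast : ((n.toNat : Nat) : Int) = n := Int.toNat_of_nonneg hn'.le
    have hRC : ∀ i j : Int, 0 ≤ i → i < n → 0 ≤ j → j < n →
        (pvRg ((PySem.List.pyRange 0 n 1).foldl (pvFWStep n) (pvFWInit A n)) i j = true ↔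
          Relation.ReflTransGen (pvE (fun v u => pvEnt A v u != 0) n) i j) := by
      intro i j h1 h2 h3 h4
      have h := pvFW_entry A n n.toNat (by omega) i j h1 h2 h3 h4
      rw [hcast] at h
      exact h.trans (pvC_iff_RTG A n hn' i j)
    have hswap : ∀ u : Int,
        Relation.ReflTransGen (pvE (fun v u => pvEnt A u v != 0) n) 0 u ↔
        Relation.ReflTransGen (pvE (fun v u => pvEnt A v u != 0) n) u 0 := by
      intro u
      constructor
      · intro h
        exact pvRTG_rev _ _ (fun x y h' => ⟨h'.2.2.1, h'.2.2.2.1, h'.1, h'.2.1, h'.2.2.2.2⟩) h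
      · intro h
        exact pvRTG_rev _ _ (fun x y h' => ⟨h'.2.2.1, h'.2.2.2.1, h'.1, h'.2.1, h'.2.2.2.2⟩) h
    have hlen : ∀ l : List Int, (PySem.Set.len l : Int) = (l.length : Int) := fun _ => rfl
    rw [Bool.eq_iff_iff]
    have hAdef : is_strongly_connected A n =
        (if (PySem.Set.len (pvBFS (fun v u => pvEnt A v u != 0) n (2 * n.toNat + 1) [0]
              (PySem.Set.add PySem.Set.empty 0)) : Int) ≠ n then false
         else decide ((PySem.Set.len (pvBFS (fun v u => pvEnt A u v != 0) n (2 * n.toNat + 1) [0]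
              (PySem.Set.add PySem.Set.empty 0)) : Int) = n)) := rfl
    have hBdef : is_strongly_connected_alt A n =
        (((PySem.List.pyRange 0 n 1).all (fun u =>
            pvRg ((PySem.List.pyRange 0 n 1).foldl (pvFWStep n) (pvFWInit A n)) 0 u)) &&
         ((PySem.List.pyRange 0 n 1).all (fun u =>
            pvRg ((PySem.List.pyRange 0 n 1).foldl (pvFWStep n) (pvFWInit A n)) u 0))) := by
      unfold is_strongly_connected_alt
      rw [if_neg hn]
    rw [hAdef, hBdef]
    have hAiff : (if (PySem.Set.len (pvBFS (fun v u => pvEnt A v u != 0) n (2 * n.toNat + 1) [0]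
              (PySem.Set.add PySem.Set.empty 0)) : Int) ≠ n then false
         else decide ((PySem.Set.len (pvBFS (fun v u => pvEnt A u v != 0) n (2 * n.toNat + 1) [0]
              (PySem.Set.add PySem.Set.empty 0)) : Int) = n)) = true ↔
        ((∀ u : Int, 0 ≤ u → u < n →
            Relation.ReflTransGen (pvE (fun v u => pvEnt A v u != 0) n) 0 u) ∧
         (∀ u : Int, 0 ≤ u → u < n →
            Relation.ReflTransGen (pvE (fun v u => pvEnt A v u != 0) n) u 0)) := by
      by_cases h1 : (PySem.Set.len (pvBFS (fun v u => pvEnt A v u != 0) n (2 * n.toNat + 1) [0]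
          (PySem.Set.add PySem.Set.empty 0)) : Int) = n
      · rw [if_neg (by simpa using h1)]
        have hPF : ∀ u : Int, 0 ≤ u → u < n →
            Relation.ReflTransGen (pvE (fun v u => pvEnt A v u != 0) n) 0 u :=
          fun u a b => (mF u).mp ((hlen _ ▸ hLF).mp h1 u a b)
        rw [decide_eq_true_iff]
        constructor
        · intro h2
          refine ⟨hPF, fun u a b => (hswap u).mp ((mB u).mp ?_)⟩
          exact (hlen _ ▸ hLB).mp h2 u a b
        · rintro ⟨_, hpb⟩
          refine (hlen _ ▸ hLB).mpr ?_
          exact fun u a b => (mB u).mpr ((hswap u).mpr (hpb u a b))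
      · rw [if_pos (by simpa using h1)]
        simp only [Bool.false_eq_true, false_iff]
        rintro ⟨hpf, _⟩
        exact h1 ((hlen _ ▸ hLF).mpr (fun u a b => (mF u).mpr (hpf u a b)))
    have hBiff : (((PySem.List.pyRange 0 n 1).all (fun u =>
            pvRg ((PySem.List.pyRange 0 n 1).foldl (pvFWStep n) (pvFWInit A n)) 0 u)) &&
         ((PySem.List.pyRange 0 n 1).all (fun u =>
            pvRg ((PySem.List.pyRange 0 n 1).foldl (pvFWStep n) (pvFWInit A n)) u 0))) = true ↔
        ((∀ u : Int, 0 ≤ u → u < n →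
            Relation.ReflTransGen (pvE (fun v u => pvEnt A v u != 0) n) 0 u) ∧
         (∀ u : Int, 0 ≤ u → u < n →
            Relation.ReflTransGen (pvE (fun v u => pvEnt A v u != 0) n) u 0)) := by
      rw [Bool.and_eq_true, List.all_eq_true, List.all_eq_true]
      constructor
      · rintro ⟨ha, hb⟩
        constructor
        · intro u a b
          exact (hRC 0 u (le_refl 0) hn' a b).mp (ha u (PySem.List.mem_pyRange_one.mpr ⟨a, b⟩))
        · intro u a b
          exact (hRC u 0 a b (le_refl 0) hn').mp (hb u (PySem.List.mem_pyRange_one.mpr ⟨a, b⟩))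
      · rintro ⟨ha, hb⟩
        constructor
        · intro u hu
          have := PySem.List.mem_pyRange_one.mp hu
          exact (hRC 0 u (le_refl 0) hn' this.1 this.2).mpr (ha u this.1 this.2)
        · intro u hu
          have := PySem.List.mem_pyRange_one.mp hu
          exact (hRC u 0 this.1 this.2 (le_refl 0) hn').mpr (hb u this.1 this.2)
    exact hAiff.trans hBiff.symm
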